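-- pv_equiv track=rewrite | github.com/MaxKHK/CodilityLessons | 11---Fibonacci-numbers/Ladder.py | solution
-- ===== SOURCE A (Python) =====
-- def solution(A,B):
--
--     #maximum B - power of 2 we will face, minus 1. We get 111111... number which we later use in
--     #bitwise AND operation
--     moduloLimit = pow(2, max(B))-1
--
--     #maximum number of rungs we will face
--     maxA = max(A)
--
--     #let's get our fibo numbers
--     fiboNumbers = [0]*(maxA + 2)
--     fiboNumbers[1]= 1
--     for i in range(2, maxA+2):
--         #notice the AND operation - which limits fibo number to
--         #the part we are interested in for modulo operations count
--         fiboNumbers[i] = (fiboNumbers[i-1] + fiboNumbers[i-2]) & moduloLimit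
--
--     #our list for results
--     result = [0] * len(A)
--
--     #now let's go each member and get the answer
--     #Number of ways to climb a ladder is i+1 fibo number
--     #Then we do a bitwise AND with a current power of 2 from B to do a modulo
--     for i in range(len(A)):
--         result[i] = fiboNumbers[A[i]+1] & (pow(2,B[i])-1)
--
--     return result
-- ===== SOURCE B (Python) =====
-- def solution(A, B):
--     # Sort query indices by rung count and do one two-variable Fibonacci sweep
--     # (masked by 2^max(B)-1), scattering each answer back to its original slot.
--     mask = pow(2, max(B)) - 1
--     order = sorted(range(len(A)), key=lambda i: A[i])
--     result = [0] * len(A)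
--     prev, cur = 0, 1
--     k = 0
--     for i in order:
--         target = A[i] + 1
--         while k < target:
--             prev, cur = cur, (prev + cur) & mask
--             k += 1
--         result[i] = prev & (pow(2, B[i]) - 1)
--     return result
-- ===== Notes on version B (the rewrite author's own statement) =====
-- stated objective: alternative
-- what changed: Instead of building a full Fibonacci table indexed by rung and doing random lookups, B sorts the query indices by rung count and runs a single two-variable masked Fibonacci sweep, scattering each masked answer back to its original position.
-- outside the precondition, e.g. on solution([4, -2], [3, 3]): A returns [5, 5], B returns [5, 0]
import Mathlib
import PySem

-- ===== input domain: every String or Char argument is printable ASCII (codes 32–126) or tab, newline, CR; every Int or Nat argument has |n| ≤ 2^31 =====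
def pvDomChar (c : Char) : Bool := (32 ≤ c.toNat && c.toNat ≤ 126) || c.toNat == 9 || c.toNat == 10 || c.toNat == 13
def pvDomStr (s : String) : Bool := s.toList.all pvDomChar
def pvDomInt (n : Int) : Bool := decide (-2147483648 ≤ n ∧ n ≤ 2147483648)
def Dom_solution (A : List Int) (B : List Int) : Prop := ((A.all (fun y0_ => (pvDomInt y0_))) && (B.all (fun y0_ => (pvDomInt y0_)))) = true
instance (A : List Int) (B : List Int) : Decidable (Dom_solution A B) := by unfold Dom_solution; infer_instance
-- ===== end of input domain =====

-- B replaces A's full Fibonacci table + random lookups by a sorted-query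
-- two-variable Fibonacci sweep that scatters answers back (alternative decomposition, not claimed faster).

-- ===== PORT A =====
def solution (A : List Int) (B : List Int) : List Int :=
  -- moduloLimit = pow(2, max(B)) - 1   (pow ported for the nonnegative exponents Pre_ admits)
  let moduloLimit : Int := 2 ^ ((PySem.List.max? B (fun x => x)).getD 0).toNat - 1
  let maxA : Int := (PySem.List.max? A (fun x => x)).getD 0
  -- fiboNumbers = [0]*(maxA+2); fiboNumbers[1] = 1
  let fibo1 : List Int := PySem.List.pySetD (List.replicate (maxA + 2).toNat 0) 1 1
  -- for i in range(2, maxA+2): fiboNumbers[i] = (fiboNumbers[i-1]+fiboNumbers[i-2]) & moduloLimit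
  let fibo : List Int := (PySem.List.pyRange 2 (maxA + 2) 1).foldl
    (fun f i => PySem.List.pySetD f i
      (PySem.Int.band (PySem.List.pyGetD f (i - 1) 0 + PySem.List.pyGetD f (i - 2) 0) moduloLimit)) fibo1
  -- result = [0]*len(A); for i in range(len(A)): result[i] = fiboNumbers[A[i]+1] & (pow(2,B[i])-1)
  (PySem.List.pyRange 0 (A.length : Int) 1).foldl
    (fun r i => PySem.List.pySetD r i
      (PySem.Int.band (PySem.List.pyGetD fibo (PySem.List.pyGetD A i 0 + 1) 0)
        (2 ^ (PySem.List.pyGetD B i 0).toNat - 1)))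
    (List.replicate A.length 0)

-- ===== PORT B =====
-- the `while k < target` loop of Source B, with fuel = its iteration count (target - k).toNat
def fibAdvance (n : Nat) (mask prev cur : Int) : Int × Int :=
  match n with
  | 0 => (prev, cur)
  | n + 1 => fibAdvance n mask cur (PySem.Int.band (prev + cur) mask)

def solution_alt (A : List Int) (B : List Int) : List Int :=
  let mask : Int := 2 ^ ((PySem.List.max? B (fun x => x)).getD 0).toNat - 1
  let order : List Int :=
    PySem.List.sorted (PySem.List.pyRange 0 (A.length : Int) 1) (fun i => PySem.List.pyGetD A i 0) false
  let st :=
    order.foldl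
      (fun (st : List Int × Int × Int × Int) i =>
        let result := st.1
        let k := st.2.1
        let prev := st.2.2.1
        let cur := st.2.2.2
        let target := PySem.List.pyGetD A i 0 + 1
        let n := (target - k).toNat
        let pc := fibAdvance n mask prev cur
        (PySem.List.pySetD result i
            (PySem.Int.band pc.1 (2 ^ (PySem.List.pyGetD B i 0).toNat - 1)),
          k + n, pc.1, pc.2))
      (List.replicate A.length 0, 0, 0, 1)
  st.1

-- ===== PRECONDITION & SPEC =====
-- Pre_ excludes: A = [] or len(B) < len(A) or max(A) = -1 (A raises ValueError resp. IndexError),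
-- negative entries of B (A raises TypeError: pow(2, b) is a float), and entries of A below -1 —
-- outside the ladder problem's natural domain, where A reads the Fibonacci table at a wrapping
-- negative index.
def Pre_solution (A : List Int) (B : List Int) : Prop :=
  A ≠ [] ∧ A.length ≤ B.length ∧ (∀ a ∈ A, -1 ≤ a) ∧ (∃ a ∈ A, 0 ≤ a) ∧ (∀ b ∈ B, 0 ≤ b)
instance (A : List Int) (B : List Int) : Decidable (Pre_solution A B) := by
  unfold Pre_solution; infer_instance
def pvWitness_solution : List Int × List Int := ([3, 1], [2, 3])

def Spec_solution (A : List Int) (B : List Int) (out : List Int) : Prop := out = solution_alt A B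
instance (A : List Int) (B : List Int) (out : List Int) : Decidable (Spec_solution A B out) := by
  unfold Spec_solution; infer_instance

-- ===== CLAIM (what is proved, stated in full; the proofs are below) =====
def Claim_equal_solution : Prop :=
  ∀ (A : List Int) (B : List Int), Dom_solution A B → Pre_solution A B → Spec_solution A B (solution A B)

-- ===== LEMMAS AND PROOFS =====

-- the masked Fibonacci sequence both programs compute
def gfib (M : Int) : Nat → Int
  | 0 => 0
  | 1 => 1
  | n + 2 => PySem.Int.band (gfib M (n + 1) + gfib M n) M

-- the value both programs write at original position j
def vClosed (A : List Int) (B : List Int) (j : Nat) : Int :=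
  PySem.Int.band
    (gfib (2 ^ ((PySem.List.max? B (fun x => x)).getD 0).toNat - 1)
      (PySem.List.pyGetD A (j : Int) 0 + 1).toNat)
    (2 ^ (PySem.List.pyGetD B (j : Int) 0).toNat - 1)

theorem fibAdvance_gfib (M : Int) (n k : Nat) :
    fibAdvance n M (gfib M k) (gfib M (k + 1)) = (gfib M (k + n), gfib M (k + n + 1)) := by
  induction n generalizing k with
  | zero => simp [fibAdvance]
  | succ n ih =>
    have h : PySem.Int.band (gfib M k + gfib M (k + 1)) M = gfib M (k + 2) := by
      rw [add_comm (gfib M k)]; rfl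
    rw [fibAdvance, h]
    have := ih (k + 1)
    simpa [Nat.add_comm, Nat.add_left_comm, Nat.add_assoc] using this

-- scatter lemma: folding "result[i] = v(i)" over an index list, the value depending only on the index
theorem scatter_spec (v : Int → Int) :
    ∀ (l : List Int) (r : List Int), (∀ i ∈ l, 0 ≤ i ∧ i < (r.length : Int)) →
      (l.foldl (fun r i => PySem.List.pySetD r i (v i)) r).length = r.length ∧
      ∀ j : Nat,
        (l.foldl (fun r i => PySem.List.pySetD r i (v i)) r)[j]? =
          if (j : Int) ∈ l then some (v j) else r[j]? := by
  intro l
  induction l with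
  | nil => intro r _; simp
  | cons i l ih =>
    intro r h
    have hi := h i (by simp)
    have hset : PySem.List.pySetD r i (v i) = r.set i.toNat (v i) :=
      PySem.List.pySetD_of_nonneg r (v i) hi.1
    have hlen' : (PySem.List.pySetD r i (v i)).length = r.length :=
      PySem.List.length_pySetD r i (v i)
    obtain ⟨ihlen, ihget⟩ := ih (PySem.List.pySetD r i (v i))
      (by intro x hx; have := h x (by simp [hx]); rwa [hlen'])
    refine ⟨by rw [List.foldl_cons, ihlen, hlen'], ?_⟩
    intro j
    rw [List.foldl_cons, ihget j]
    by_cases hjl : (j : Int) ∈ l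
    · simp [hjl]
    · by_cases hji : (j : Int) = i
      · have hnat : i.toNat = j := by omega
        have hb : i.toNat < r.length := by omega
        rw [if_neg hjl, if_pos (show ((j : Nat) : Int) ∈ i :: l by simp [hji]),
          hset, List.getElem?_set, if_pos hnat, if_pos (hnat ▸ hb), hji]
      · have hnat : ¬ i.toNat = j := by omega
        rw [if_neg hjl, if_neg (by simp [hjl, hji]), hset, List.getElem?_set, if_neg hnat]

-- the Fibonacci-table loop of A fills slot j with gfib M j (slots beyond the loop stay 0)
theorem fib_table (M maxA : Int) (h0 : 0 ≤ maxA) :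
    ∀ (m : Nat), (m : Int) ≤ maxA →
      ((PySem.List.pyRange 2 (2 + (m : Int))).foldl
          (fun f i => PySem.List.pySetD f i
            (PySem.Int.band (PySem.List.pyGetD f (i - 1) 0 + PySem.List.pyGetD f (i - 2) 0) M))
          (PySem.List.pySetD (List.replicate (maxA + 2).toNat 0) 1 1)).length = (maxA + 2).toNat ∧
      ∀ j : Nat, j < (maxA + 2).toNat →
        ((PySem.List.pyRange 2 (2 + (m : Int))).foldl
            (fun f i => PySem.List.pySetD f i
              (PySem.Int.band (PySem.List.pyGetD f (i - 1) 0 + PySem.List.pyGetD f (i - 2) 0) M))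
            (PySem.List.pySetD (List.replicate (maxA + 2).toNat 0) 1 1))[j]? =
          some (if j < 2 + m then gfib M j else 0) := by
  intro m
  induction m with
  | zero =>
    intro _
    rw [PySem.List.pyRange_one_eq_nil (by simp)]
    simp only [List.foldl_nil]
    have hset : PySem.List.pySetD (List.replicate (maxA + 2).toNat (0 : Int)) 1 1 =
        (List.replicate (maxA + 2).toNat (0 : Int)).set 1 1 := by
      rw [PySem.List.pySetD_of_nonneg _ _ (by norm_num)]; rfl
    refine ⟨by rw [hset]; simp, ?_⟩
    intro j hj
    rw [hset, List.getElem?_set]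
    rcases j with _ | _ | j
    · simp [hj, gfib]
    · have h1 : 1 < (maxA + 2).toNat := by omega
      simp [List.length_replicate, h1, gfib]
    · have h2 : ¬ (j + 2 < 2 + 0) := by omega
      simp [hj, h2]
  | succ m ih =>
    intro hm
    obtain ⟨ihlen, ihget⟩ := ih (by omega)
    have hsplit : PySem.List.pyRange 2 (2 + ((m + 1 : Nat) : Int)) =
        PySem.List.pyRange 2 (2 + (m : Int)) ++ [2 + (m : Int)] := by
      have : (2 + ((m + 1 : Nat) : Int)) = (2 + (m : Int)) + 1 := by omega
      rw [this, PySem.List.pyRange_one_succ_right (by omega)]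
    rw [hsplit, List.foldl_append]
    simp only [List.foldl_cons, List.foldl_nil]
    -- values read by the update at index 2+m
    have hidx1 : (2 + (m : Int)) - 1 = ((m + 1 : Nat) : Int) := by omega
    have hidx2 : (2 + (m : Int)) - 2 = ((m : Nat) : Int) := by omega
    have hg1 : PySem.List.pyGetD
        ((PySem.List.pyRange 2 (2 + (m : Int))).foldl
          (fun f i => PySem.List.pySetD f i
            (PySem.Int.band (PySem.List.pyGetD f (i - 1) 0 + PySem.List.pyGetD f (i - 2) 0) M))
          (PySem.List.pySetD (List.replicate (maxA + 2).toNat 0) 1 1)) ((2 + (m : Int)) - 1) 0 =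
        gfib M (m + 1) := by
      rw [hidx1, PySem.List.pyGetD_natCast]
      have := ihget (m + 1) (by omega)
      rw [List.getD_eq_getElem?_getD, this]
      simp
      omega
    have hg2 : PySem.List.pyGetD
        ((PySem.List.pyRange 2 (2 + (m : Int))).foldl
          (fun f i => PySem.List.pySetD f i
            (PySem.Int.band (PySem.List.pyGetD f (i - 1) 0 + PySem.List.pyGetD f (i - 2) 0) M))
          (PySem.List.pySetD (List.replicate (maxA + 2).toNat 0) 1 1)) ((2 + (m : Int)) - 2) 0 =
        gfib M m := by
      rw [hidx2, PySem.List.pyGetD_natCast]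
      have := ihget m (by omega)
      rw [List.getD_eq_getElem?_getD, this]
      simp
    rw [hg1, hg2]
    have hval : PySem.Int.band (gfib M (m + 1) + gfib M m) M = gfib M (m + 2) := rfl
    rw [hval]
    have hsetstep : PySem.List.pySetD
        ((PySem.List.pyRange 2 (2 + (m : Int))).foldl
          (fun f i => PySem.List.pySetD f i
            (PySem.Int.band (PySem.List.pyGetD f (i - 1) 0 + PySem.List.pyGetD f (i - 2) 0) M))
          (PySem.List.pySetD (List.replicate (maxA + 2).toNat 0) 1 1)) (2 + (m : Int)) (gfib M (m + 2)) =
        ((PySem.List.pyRange 2 (2 + (m : Int))).foldl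
          (fun f i => PySem.List.pySetD f i
            (PySem.Int.band (PySem.List.pyGetD f (i - 1) 0 + PySem.List.pyGetD f (i - 2) 0) M))
          (PySem.List.pySetD (List.replicate (maxA + 2).toNat 0) 1 1)).set (m + 2) (gfib M (m + 2)) := by
      rw [PySem.List.pySetD_of_nonneg _ _ (by omega)]
      congr 1
      omega
    rw [hsetstep]
    refine ⟨by rw [List.length_set, ihlen], ?_⟩
    intro j hj
    rw [List.getElem?_set, ihlen]
    by_cases hje : m + 2 = j
    · rw [if_pos hje, if_pos (by omega)]
      subst hje
      rw [if_pos (by omega)]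
    · rw [if_neg hje, ihget j hj]
      by_cases hlt : j < 2 + m
      · rw [if_pos hlt, if_pos (by omega)]
      · rw [if_neg hlt, if_neg (by omega)]

-- characterization of port A
theorem solutionA_char (A B : List Int) (hA : A ≠ []) (hpos : ∀ a ∈ A, -1 ≤ a)
    (hsome : ∃ a ∈ A, 0 ≤ a) :
    solution A B = (List.range A.length).map (vClosed A B) := by
  obtain ⟨mA, hmA⟩ : ∃ mA, PySem.List.max? A (fun x => x) = some mA := by
    cases h : PySem.List.max? A (fun x => x) with
    | none => exact absurd ((PySem.List.max?_eq_none_iff A _).mp h) hA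
    | some m => exact ⟨m, rfl⟩
  have hmem := PySem.List.max?_mem hmA
  have hub : ∀ y ∈ A, y ≤ mA := fun y hy => PySem.List.max?_isMax hmA y hy
  have h0 : 0 ≤ mA := by
    obtain ⟨a, ha, h0a⟩ := hsome
    exact le_trans h0a (hub a ha)
  apply List.ext_getElem?
  intro j
  simp only [solution, hmA, Option.getD_some]
  rw [show PySem.List.pyRange 2 (mA + 2) = PySem.List.pyRange 2 (2 + ((mA.toNat : Nat) : Int)) from
    by rw [show mA + 2 = 2 + ((mA.toNat : Nat) : Int) by omega]]
  set F := ((PySem.List.pyRange 2 (2 + ((mA.toNat : Nat) : Int))).foldl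
      (fun f i => PySem.List.pySetD f i
        (PySem.Int.band (PySem.List.pyGetD f (i - 1) 0 + PySem.List.pyGetD f (i - 2) 0)
          (2 ^ ((PySem.List.max? B (fun x => x)).getD 0).toNat - 1)))
      (PySem.List.pySetD (List.replicate (mA + 2).toNat 0) 1 1)) with hF
  obtain ⟨hTlen, hTget⟩ :=
    fib_table (2 ^ ((PySem.List.max? B (fun x => x)).getD 0).toNat - 1) mA h0 mA.toNat (by omega)
  rw [← hF] at hTlen hTget
  obtain ⟨hSlen, hSget⟩ := scatter_spec
    (fun i => PySem.Int.band (PySem.List.pyGetD F (PySem.List.pyGetD A i 0 + 1) 0)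
      (2 ^ (PySem.List.pyGetD B i 0).toNat - 1))
    (PySem.List.pyRange 0 (A.length : Int)) (List.replicate A.length 0)
    (by intro x hx
        rw [PySem.List.mem_pyRange_one] at hx
        simp only [List.length_replicate]
        exact hx)
  rw [hSget j]
  by_cases hj : j < A.length
  · have hmemr : ((j : Nat) : Int) ∈ PySem.List.pyRange 0 (A.length : Int) := by
      rw [PySem.List.mem_pyRange_one]; omega
    rw [if_pos hmemr]
    have hrhs : (List.map (vClosed A B) (List.range A.length))[j]? = some (vClosed A B j) := by
      simp [hj]
    rw [hrhs]
    have hAmem : PySem.List.pyGetD A (j : Int) 0 ∈ A := by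
      apply PySem.List.pyGetD_mem
      constructor <;> omega
    have h0a := hpos _ hAmem
    have hua := hub _ hAmem
    have hFv : PySem.List.pyGetD F (PySem.List.pyGetD A (j : Int) 0 + 1) 0 =
        gfib (2 ^ ((PySem.List.max? B (fun x => x)).getD 0).toNat - 1)
          (PySem.List.pyGetD A (j : Int) 0 + 1).toNat := by
      have hlt : PySem.List.pyGetD A (j : Int) 0 + 1 < (F.length : Int) := by
        rw [hTlen]; omega
      rw [PySem.List.pyGetD_eq_getElem F 0 (by omega) hlt]
      have h2 := hTget (PySem.List.pyGetD A (j : Int) 0 + 1).toNat (by rw [hTlen] at hlt; omega)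
      rw [if_pos (by omega)] at h2
      rw [List.getElem?_eq_getElem (by rw [hTlen] at hlt; omega)] at h2
      exact Option.some.inj h2
    rw [hFv]
    rfl
  · rw [if_neg (by rw [PySem.List.mem_pyRange_one]; omega)]
    simp [hj]

-- the sweep loop of B equals a plain scatter of the closed-form values
theorem sweep_fold (A B : List Int) (M : Int) :
    ∀ (l : List Int) (res : List Int) (k prev cur : Int), 0 ≤ k →
      prev = gfib M k.toNat → cur = gfib M (k.toNat + 1) →
      l.Pairwise (fun a b => PySem.List.pyGetD A a 0 ≤ PySem.List.pyGetD A b 0) →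
      (∀ i ∈ l, k ≤ PySem.List.pyGetD A i 0 + 1) →
      (l.foldl
        (fun (st : List Int × Int × Int × Int) i =>
          let result := st.1
          let k := st.2.1
          let prev := st.2.2.1
          let cur := st.2.2.2
          let target := PySem.List.pyGetD A i 0 + 1
          let n := (target - k).toNat
          let pc := fibAdvance n M prev cur
          (PySem.List.pySetD result i
              (PySem.Int.band pc.1 (2 ^ (PySem.List.pyGetD B i 0).toNat - 1)),
            k + n, pc.1, pc.2))
        (res, k, prev, cur)).1 =
      l.foldl (fun r i => PySem.List.pySetD r i
          (PySem.Int.band (gfib M (PySem.List.pyGetD A i 0 + 1).toNat)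
            (2 ^ (PySem.List.pyGetD B i 0).toNat - 1))) res := by
  intro l
  induction l with
  | nil => intro res k prev cur _ _ _ _ _; rfl
  | cons i l ih =>
    intro res k prev cur hk hp hc hpw hlow
    have hki : k ≤ PySem.List.pyGetD A i 0 + 1 := hlow i (by simp)
    have hknat : k.toNat + (PySem.List.pyGetD A i 0 + 1 - k).toNat =
        (PySem.List.pyGetD A i 0 + 1).toNat := by omega
    have hadv : fibAdvance (PySem.List.pyGetD A i 0 + 1 - k).toNat M prev cur =
        (gfib M (PySem.List.pyGetD A i 0 + 1).toNat,
         gfib M ((PySem.List.pyGetD A i 0 + 1).toNat + 1)) := by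
      rw [hp, hc, fibAdvance_gfib, hknat]
    have hkn : k + (((PySem.List.pyGetD A i 0 + 1 - k).toNat : Nat) : Int) =
        PySem.List.pyGetD A i 0 + 1 := by omega
    rw [List.foldl_cons, List.foldl_cons]
    show (List.foldl _
        ((PySem.List.pySetD res i
            (PySem.Int.band
              (fibAdvance (PySem.List.pyGetD A i 0 + 1 - k).toNat M prev cur).1
              (2 ^ (PySem.List.pyGetD B i 0).toNat - 1)),
          k + (((PySem.List.pyGetD A i 0 + 1 - k).toNat : Nat) : Int),
          (fibAdvance (PySem.List.pyGetD A i 0 + 1 - k).toNat M prev cur).1,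
          (fibAdvance (PySem.List.pyGetD A i 0 + 1 - k).toNat M prev cur).2) :
          List Int × Int × Int × Int) l).1 = _
    simp only [hadv, hkn]
    exact ih _ _ _ _ (by omega) rfl rfl
      (List.Pairwise.sublist (List.sublist_cons_self i l) hpw)
      (fun x hx => by have := (List.pairwise_cons.mp hpw).1 x hx; omega)

-- characterization of port B
theorem solutionB_char (A B : List Int) (hpos : ∀ a ∈ A, -1 ≤ a) :
    solution_alt A B = (List.range A.length).map (vClosed A B) := by
  simp only [solution_alt]
  have hpw := PySem.List.sorted_pairwise (PySem.List.pyRange 0 (A.length : Int))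
    (fun i => PySem.List.pyGetD A i 0)
  have hmemA : ∀ i ∈ PySem.List.sorted (PySem.List.pyRange 0 (A.length : Int))
      (fun i => PySem.List.pyGetD A i 0) false, 0 ≤ i ∧ i < (A.length : Int) := by
    intro i hi
    rw [PySem.List.mem_sorted, PySem.List.mem_pyRange_one] at hi
    exact hi
  rw [sweep_fold A B (2 ^ ((PySem.List.max? B (fun x => x)).getD 0).toNat - 1)
      (PySem.List.sorted (PySem.List.pyRange 0 (A.length : Int))
        (fun i => PySem.List.pyGetD A i 0) false)
      (List.replicate A.length 0) 0 0 1 (by omega) (by rfl) (by rfl) hpw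
      (by intro i hi
          have h1 := hmemA i hi
          have : PySem.List.pyGetD A i 0 ∈ A := by
            apply PySem.List.pyGetD_mem
            constructor <;> omega
          have := hpos _ this
          omega)]
  obtain ⟨hSlen, hSget⟩ := scatter_spec
    (fun i => PySem.Int.band
      (gfib (2 ^ ((PySem.List.max? B (fun x => x)).getD 0).toNat - 1)
        (PySem.List.pyGetD A i 0 + 1).toNat)
      (2 ^ (PySem.List.pyGetD B i 0).toNat - 1))
    (PySem.List.sorted (PySem.List.pyRange 0 (A.length : Int))
      (fun i => PySem.List.pyGetD A i 0) false)
    (List.replicate A.length 0)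
    (by intro x hx
        simp only [List.length_replicate]
        exact hmemA x hx)
  apply List.ext_getElem?
  intro j
  rw [hSget j, List.getElem?_map]
  by_cases hj : j < A.length
  · rw [if_pos (by rw [PySem.List.mem_sorted, PySem.List.mem_pyRange_one]; omega)]
    simp only [List.getElem?_range, hj]
    rfl
  · rw [if_neg (by rw [PySem.List.mem_sorted, PySem.List.mem_pyRange_one]; omega)]
    simp [hj]

-- ===== VERDICT (by name: the statement is the Claim_ definition above) =====
theorem solution_spec : Claim_equal_solution := by
  intro A B _ hpre
  obtain ⟨hA, _, hposA, hsomeA, _⟩ := hpre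
  show solution A B = solution_alt A B
  rw [solutionA_char A B hA hposA hsomeA, solutionB_char A B hposA]
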